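-- pv_equiv track=rewrite | github.com/ian1roberts/wwfsolver | wwfs/utils.py | permute_racks
-- ===== SOURCE A (Python) =====
-- import itertools
--
-- def permute_racks(racks, DICT):
--     result = set()
--     for rack in racks:
--         maxlen = len(rack) + 1
--         for wl in range(2, maxlen):
--             for yword in itertools.permutations(rack, r=wl):
--                 yword = "".join(yword)
--                 if yword in DICT:
--                     result.add(yword)
--     return result
-- ===== SOURCE B (Python) =====
-- def permute_racks(racks, DICT):
--     # index the dictionary once: every nonempty prefix of every usable word
--     prefixes = set()
--     for w in DICT:
--         if len(w) >= 2:
--             for i in range(1, len(w) + 1):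
--                 prefixes.add(w[:i])
--     result = set()
--     for rack in racks:
--         for wl in range(2, len(rack) + 1):
--             _extend(rack, wl, "", prefixes, DICT, result)
--     return result
--
-- def _extend(rack, wl, prefix, prefixes, DICT, result):
--     # backtracking over rack positions, pruned by the dictionary prefix index
--     if len(prefix) == wl:
--         if prefix in DICT:
--             result.add(prefix)
--         return
--     for i in range(len(rack)):
--         cand = prefix + rack[i]
--         if cand in prefixes:
--             _extend(rack[:i] + rack[i + 1:], wl, cand, prefixes, DICT, result)
-- ===== Notes on version B (the rewrite author's own statement) =====
-- stated objective: alternative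
-- what changed: Instead of enumerating every permutation of every rack and testing each against the dictionary, B builds a one-time index of all nonempty prefixes of dictionary words (length >= 2) and runs a backtracking search over rack letters that abandons any partial word that is not a dictionary-word prefix.
import Mathlib
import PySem

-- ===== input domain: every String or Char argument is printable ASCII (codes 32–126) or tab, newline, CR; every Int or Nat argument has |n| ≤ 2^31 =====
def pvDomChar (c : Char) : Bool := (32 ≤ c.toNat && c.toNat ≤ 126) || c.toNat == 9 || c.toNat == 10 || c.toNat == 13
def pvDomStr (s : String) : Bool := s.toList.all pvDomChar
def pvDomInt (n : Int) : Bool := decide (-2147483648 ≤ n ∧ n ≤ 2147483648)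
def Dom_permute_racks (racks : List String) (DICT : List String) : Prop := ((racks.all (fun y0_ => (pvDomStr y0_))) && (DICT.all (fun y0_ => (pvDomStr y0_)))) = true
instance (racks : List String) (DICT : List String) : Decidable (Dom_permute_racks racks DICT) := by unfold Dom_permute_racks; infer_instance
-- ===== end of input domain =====

-- B replaces A's exhaustive enumeration of all rack permutations with a backtracking
-- search over rack letters pruned by a prefix index of the dictionary (built once); same result set.

-- ===== PORT A =====
-- A: for each rack, for each word length 2..len(rack), enumerate ALL permutations
-- of the rack's letters and keep those that are in DICT (a Python set).
def permute_racks (racks : List String) (DICT : List String) : List String :=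
  racks.foldl (fun result rack =>
    let maxlen : Int := (rack.toList.length : Int) + 1
    (PySem.List.pyRange 2 maxlen).foldl (fun result wl =>
      (PySem.List.permutations rack.toList wl.toNat).foldl (fun result t =>
        let yword := String.ofList t
        if PySem.Set.contains DICT yword then PySem.Set.add result yword else result)
        result) result) []

-- ===== PORT B =====
-- Source B helper: the set of all nonempty prefixes of dictionary words of length ≥ 2
def pvPrefixIndex (DICT : List String) : PySem.Set String :=
  DICT.foldl (fun prefixes w =>
    if 2 ≤ w.toList.length then
      (PySem.List.pyRange 1 ((w.toList.length : Int) + 1)).foldl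
        (fun prefixes i => PySem.Set.add prefixes (String.ofList (w.toList.take i.toNat)))
        prefixes
    else prefixes) PySem.Set.empty

-- Source B helper _extend: backtracking over rack positions, pruned by the prefix index
-- (the `.attach`/`rack[i]?` formulation is only to justify termination / total indexing)
def pvExtend (prefixes : PySem.Set String) (DICT : List String) (wl : Nat)
    (rack pfx : List Char) (result : PySem.Set String) : PySem.Set String :=
  if pfx.length = wl then
    if PySem.Set.contains DICT (String.ofList pfx) then PySem.Set.add result (String.ofList pfx)
    else result
  else
    (List.range rack.length).attach.foldl (fun result i =>
      match rack[i.1]? with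
      | none => result
      | some c =>
        if PySem.Set.contains prefixes (String.ofList (pfx ++ [c])) then
          pvExtend prefixes DICT wl (rack.eraseIdx i.1) (pfx ++ [c]) result
        else result) result
termination_by rack.length
decreasing_by
  have h := List.mem_range.mp i.2
  simp [List.length_eraseIdx, h]
  omega

def permute_racks_alt (racks : List String) (DICT : List String) : List String :=
  let prefixes := pvPrefixIndex DICT
  racks.foldl (fun result rack =>
    (PySem.List.pyRange 2 ((rack.toList.length : Int) + 1)).foldl
      (fun result wl => pvExtend prefixes DICT wl.toNat rack.toList [] result) result) []

-- ===== PRECONDITION & SPEC =====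
def Spec_permute_racks (racks : List String) (DICT : List String) (out : List String) : Prop := out = permute_racks_alt racks DICT
instance (racks : List String) (DICT : List String) (out : List String) : Decidable (Spec_permute_racks racks DICT out) := by unfold Spec_permute_racks; infer_instance

-- ===== CLAIM (what is proved, stated in full; the proofs are below) =====
def Claim_equal_permute_racks : Prop := ∀ (racks : List String) (DICT : List String), Dom_permute_racks racks DICT → Spec_permute_racks racks DICT (permute_racks racks DICT)

-- ===== LEMMAS AND PROOFS =====

-- a foldl step that preserves a property preserves it over the whole fold
theorem pv_foldl_pres {α β : Type} (l : List α) (g : β → α → β) (P : β → Prop) (b : β)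
    (hg : ∀ b a, a ∈ l → P b → P (g b a)) (hb : P b) : P (l.foldl g b) := by
  induction l generalizing b with
  | nil => exact hb
  | cons a l ih =>
    exact ih _ (fun b' a' ha' hb' => hg b' a' (List.mem_cons_of_mem _ ha') hb')
      (hg b a (List.mem_cons_self) hb)

-- a property established at one element and preserved afterwards holds of the fold
theorem pv_foldl_hit {α β : Type} (l : List α) (g : β → α → β) (P : β → Prop) (b : β)
    (hg : ∀ b a, a ∈ l → P b → P (g b a)) {a : α} (ha : a ∈ l) (hhit : ∀ b, P (g b a)) :
    P (l.foldl g b) := by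
  induction l generalizing b with
  | nil => cases ha
  | cons x l ih =>
    rcases List.mem_cons.mp ha with rfl | ha'
    · exact pv_foldl_pres l g P _ (fun b' a' ha' => hg b' a' (List.mem_cons_of_mem _ ha'))
        (hhit b)
    · exact ih _ (fun b' a' h hb' => hg b' a' (List.mem_cons_of_mem _ h) hb') ha'

-- a fold whose step never changes the accumulator is the identity
theorem pv_foldl_id {α β : Type} (l : List α) (f : β → α → β) (b : β)
    (h : ∀ a ∈ l, ∀ acc, f acc a = acc) : l.foldl f b = b := by
  induction l generalizing b with
  | nil => rfl
  | cons a l ih =>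
    rw [List.foldl_cons, h a List.mem_cons_self]
    exact ih _ (fun a' ha' => h a' (List.mem_cons_of_mem _ ha'))

theorem pv_length_of_mem_perms {α : Type} {r : Nat} :
    ∀ {xs p : List α}, p ∈ PySem.List.permutations xs r → p.length = r := by
  induction r with
  | zero =>
    intro xs p hp
    have : p = [] := by simpa [PySem.List.permutations] using hp
    simp [this]
  | succ r ih =>
    intro xs p hp
    rw [PySem.List.permutations.eq_2] at hp
    rcases List.mem_flatMap.mp hp with ⟨i, _, hpi⟩
    cases hx : xs[i]? with
    | none => rw [hx] at hpi; cases hpi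
    | some c =>
      rw [hx] at hpi
      rcases List.mem_map.mp hpi with ⟨q, hq, rfl⟩
      simp [ih hq]

-- every nonempty prefix of a dictionary word of length ≥ 2 is in the prefix index
theorem pv_mem_prefixIndex {DICT : List String} {w : String} (hw : w ∈ DICT)
    (h2 : 2 ≤ w.toList.length) {k : Nat} (hk1 : 1 ≤ k) (hk2 : k ≤ w.toList.length) :
    String.ofList (w.toList.take k) ∈ pvPrefixIndex DICT := by
  unfold pvPrefixIndex
  refine pv_foldl_hit _ _ _ _ ?mono hw ?hit
  case mono =>
    intro b a _ hb
    split
    · exact pv_foldl_pres _ _ _ _ (fun b' i _ hb' => (PySem.Set.mem_add _ _ _).mpr (Or.inl hb')) hb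
    · exact hb
  case hit =>
    intro b
    rw [if_pos h2]
    refine pv_foldl_hit _ _ _ _ ?imono (a := (k : Int)) ?ik ?ihit
    case imono =>
      intro b' i _ hb'
      exact (PySem.Set.mem_add _ _ _).mpr (Or.inl hb')
    case ik => rw [PySem.List.mem_pyRange_one]; omega
    case ihit =>
      intro b'
      have hkk : ((k : Int)).toNat = k := by omega
      rw [hkk]
      exact (PySem.Set.mem_add _ _ _).mpr (Or.inr rfl)

-- the pruned backtracking search equals A's filter over all permutations
theorem pv_extend_eq (DICT : List String) (wl : Nat) (hwl : 2 ≤ wl) :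
    ∀ (r : Nat) (rack pfx : List Char) (res : PySem.Set String), pfx.length + r = wl →
    pvExtend (pvPrefixIndex DICT) DICT wl rack pfx res
      = (PySem.List.permutations rack r).foldl
          (fun res t =>
            if PySem.Set.contains DICT (String.ofList (pfx ++ t)) then
              PySem.Set.add res (String.ofList (pfx ++ t)) else res) res := by
  intro r
  induction r with
  | zero =>
    intro rack pfx res hlen
    have hl : pfx.length = wl := by omega
    unfold pvExtend
    rw [if_pos hl]
    show _ = List.foldl _ res [[]]
    simp
  | succ r ih =>
    intro rack pfx res hlen
    have hne : pfx.length ≠ wl := by omega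
    unfold pvExtend
    rw [if_neg hne, PySem.List.permutations.eq_2, List.foldl_flatMap]
    conv_rhs => rw [← List.attach_map_subtype_val (List.range rack.length)]
    rw [List.foldl_map]
    apply PySem.List.foldl_congr_mem
    intro acc i _
    have hi : i.1 ∈ List.range rack.length := i.2
    have hilt : i.1 < rack.length := List.mem_range.mp hi
    rw [List.getElem?_eq_getElem hilt]
    dsimp only
    by_cases hc : PySem.Set.contains (pvPrefixIndex DICT) (String.ofList (pfx ++ [rack[i.1]])) = true
    · rw [if_pos hc, ih (rack.eraseIdx i.1) (pfx ++ [rack[i.1]]) acc (by simp; omega),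
        List.foldl_map]
      apply PySem.List.foldl_congr_mem
      intro acc' p _
      simp [List.append_assoc]
    · rw [if_neg hc, List.foldl_map]
      symm
      apply pv_foldl_id
      intro p hp acc'
      suffices hdc : ¬ PySem.Set.contains DICT (String.ofList (pfx ++ rack[i.1] :: p)) = true by
        rw [if_neg hdc]
      intro hmem
      apply hc
      rw [PySem.Set.contains_iff] at hmem ⊢
      have hlenp : p.length = r := pv_length_of_mem_perms hp
      have htake : (String.ofList (pfx ++ rack[i.1] :: p)).toList.take (pfx.length + 1)
          = pfx ++ [rack[i.1]] := by
        simp [List.take_append, List.take_of_length_le (le_of_lt (Nat.lt_succ_self _))]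
      have hsl : (String.ofList (pfx ++ rack[i.1] :: p)).toList.length
          = pfx.length + (p.length + 1) := by simp
      have := pv_mem_prefixIndex (w := String.ofList (pfx ++ rack[i.1] :: p)) hmem
        (by rw [hsl]; omega) (k := pfx.length + 1) (by omega) (by rw [hsl]; omega)
      rwa [htake] at this

-- ===== VERDICT (by name: the statement is the Claim_ definition above) =====
theorem permute_racks_spec : Claim_equal_permute_racks := by
  intro racks DICT _
  unfold Spec_permute_racks permute_racks permute_racks_alt
  apply PySem.List.foldl_congr_mem
  intro acc rack _
  apply PySem.List.foldl_congr_mem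
  intro acc2 wl hwl
  have h := PySem.List.mem_pyRange_one.mp hwl
  rw [pv_extend_eq DICT wl.toNat (by omega) wl.toNat rack.toList [] acc2 (by simp)]
  simp
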